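-- pv_equiv track=rewrite | github.com/pabloschwarzenberg/grader | tema9_ej3/tema9_ej3_ddcda5941b462b824821ae1cdf6271d2.py | esCambio
-- ===== SOURCE A (Python) =====
-- def esCambio(str1, str2):
--
--   strAux = ''
--
--   encontrada = False
--
--   i = 0
--
--   while i < len(str1) and not(encontrada):
--
--     if str1[i] != str2[i]:
--
--       encontrada = True
--
--       strAux = strAux + str2[i + 1 : len(str2)]
--
--     else:
--
--       strAux = strAux + str2[i]
--
--     i = i + 1
--
--   return strAux == str1
-- ===== SOURCE B (Python) =====
-- def esCambio(str1, str2):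
--     k = 0
--     m = min(len(str1), len(str2))
--     while k < m and str1[k] == str2[k]:
--         k += 1
--     if k == len(str1):
--         return True
--     return str1[k:] == str2[k + 1:]
-- ===== Notes on version B (the rewrite author's own statement) =====
-- stated objective: faster
-- what changed: Instead of rebuilding str1 by concatenating characters one at a time and comparing the accumulated string, B scans to the first mismatch index and does a single slice comparison str1[k:] == str2[k+1:].
import Mathlib
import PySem

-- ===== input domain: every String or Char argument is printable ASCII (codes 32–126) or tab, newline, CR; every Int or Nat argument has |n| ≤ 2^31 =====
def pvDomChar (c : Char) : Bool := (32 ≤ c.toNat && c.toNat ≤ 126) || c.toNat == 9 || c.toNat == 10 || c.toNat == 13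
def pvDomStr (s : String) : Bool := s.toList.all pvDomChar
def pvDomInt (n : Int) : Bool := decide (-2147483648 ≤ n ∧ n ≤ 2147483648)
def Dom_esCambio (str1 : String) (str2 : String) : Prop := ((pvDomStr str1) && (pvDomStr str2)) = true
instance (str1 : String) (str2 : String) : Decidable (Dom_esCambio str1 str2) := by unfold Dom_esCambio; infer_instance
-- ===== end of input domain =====

-- B replaces A's quadratic character-by-character string building with a single scan to the
-- first mismatch followed by one slice comparison (objective: faster; return value only).

-- ===== PORT A =====
-- A's while loop over index i, carrying strAux; rendered as recursion over the remaining
-- suffixes of str1/str2 (str1[i] = head of the first suffix, str2[i+1:] = tail of the second).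
-- The `[] → false` case is where Python raises IndexError on str2[i] (excluded by Pre_).
def esCambioGo (l1 : List Char) : List Char → List Char → List Char → Bool
  | acc, [], _ => acc == l1
  | _acc, _ :: _, [] => false
  | acc, c1 :: r1, c2 :: r2 =>
    if c1 != c2 then (acc ++ r2) == l1
    else esCambioGo l1 (acc ++ [c2]) r1 r2

def esCambio (str1 : String) (str2 : String) : Bool :=
  esCambioGo str1.toList [] str1.toList str2.toList

-- ===== PORT B =====
-- B's while loop advancing k to the first mismatch within min(len1, len2).
def esCambioAltLoop (l1 l2 : List Char) (k : Nat) : Bool :=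
  if h : k < min l1.length l2.length ∧ l1.getD k ' ' = l2.getD k ' ' then
    esCambioAltLoop l1 l2 (k + 1)
  else if k = l1.length then true
  else PySem.List.slice l1 (some (k : Int)) none ==
       PySem.List.slice l2 (some ((k + 1 : Nat) : Int)) none
termination_by l1.length - k
decreasing_by omega

def esCambio_alt (str1 : String) (str2 : String) : Bool :=
  esCambioAltLoop str1.toList str2.toList 0

-- ===== PRECONDITION & SPEC =====
-- Pre_ excludes exactly the inputs where Python A raises IndexError: str2 a proper prefix of str1.
def Pre_esCambio (str1 : String) (str2 : String) : Prop :=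
  ¬ (str2.toList.length < str1.toList.length ∧
     str1.toList.take str2.toList.length = str2.toList)
instance (str1 : String) (str2 : String) : Decidable (Pre_esCambio str1 str2) := by
  unfold Pre_esCambio; infer_instance
def pvWitness_esCambio : String × String := ("abc", "abd")

def Spec_esCambio (str1 : String) (str2 : String) (out : Bool) : Prop := out = esCambio_alt str1 str2
instance (str1 : String) (str2 : String) (out : Bool) : Decidable (Spec_esCambio str1 str2 out) := by unfold Spec_esCambio; infer_instance

-- ===== CLAIM (what is proved, stated in full; the proofs are below) =====
def Claim_equal_esCambio : Prop := ∀ (str1 : String) (str2 : String), Dom_esCambio str1 str2 → Pre_esCambio str1 str2 → Spec_esCambio str1 str2 (esCambio str1 str2)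

-- ===== LEMMAS AND PROOFS =====

-- common reference function both loops reduce to
def pvSpecFn : List Char → List Char → Bool
  | [], _ => true
  | _ :: _, [] => false
  | c1 :: r1, c2 :: r2 => if c1 = c2 then pvSpecFn r1 r2 else (c1 :: r1) == r2

lemma esCambioGo_eq (r1 : List Char) : ∀ (r2 p : List Char),
    esCambioGo (p ++ r1) p r1 r2 = pvSpecFn r1 r2 := by
  induction r1 with
  | nil => intro r2 p; simp [esCambioGo, pvSpecFn]
  | cons c1 r1 ih =>
    intro r2 p
    cases r2 with
    | nil => simp [esCambioGo, pvSpecFn]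
    | cons c2 r2 =>
      by_cases h : c1 = c2
      · subst h
        have e1 : p ++ c1 :: r1 = (p ++ [c1]) ++ r1 := by simp
        conv_lhs => rw [esCambioGo]
        rw [if_neg (by simp), e1, ih r2 (p ++ [c1])]
        conv_rhs => rw [pvSpecFn]
        simp
      · conv_lhs => rw [esCambioGo]
        rw [if_pos (by simp [h]), ]
        conv_rhs => rw [pvSpecFn]
        rw [if_neg h]
        by_cases h2 : r2 = c1 :: r1
        · subst h2; simp
        · have h3 : ¬ (c1 :: r1 = r2) := fun hh => h2 hh.symm
          simp [List.append_right_inj, h2, h3]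

lemma esCambioAltLoop_eq (r1 : List Char) : ∀ (r2 p : List Char),
    esCambioAltLoop (p ++ r1) (p ++ r2) p.length = pvSpecFn r1 r2 := by
  induction r1 with
  | nil =>
    intro r2 p
    rw [esCambioAltLoop]
    simp [pvSpecFn]
  | cons c1 r1 ih =>
    intro r2 p
    cases r2 with
    | nil =>
      rw [esCambioAltLoop]
      have h1 : ¬ (p.length < min (p ++ c1 :: r1).length (p ++ ([] : List Char)).length ∧
          (p ++ c1 :: r1).getD p.length ' ' = (p ++ ([] : List Char)).getD p.length ' ') := by
        simp
      rw [dif_neg h1]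
      have h2 : p.length ≠ (p ++ c1 :: r1).length := by simp
      rw [if_neg h2]
      have s2 : PySem.List.slice p (some ((p.length : Int) + 1)) none
          = ([] : List Char) := by
        rw [show ((p.length : Int) + 1) = (((p.length + 1 : Nat)) : Int) by push_cast; ring,
          PySem.List.slice_from_natCast]
        simp [List.drop_eq_nil_of_le]
      simp [PySem.List.slice_from_natCast, s2, pvSpecFn]
    | cons c2 r2 =>
      rw [esCambioAltLoop]
      have hg1 : (p ++ c1 :: r1).getD p.length ' ' = c1 := by
        simp [List.getD, List.getElem?_append_right (le_refl p.length)]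
      have hg2 : (p ++ c2 :: r2).getD p.length ' ' = c2 := by
        simp [List.getD, List.getElem?_append_right (le_refl p.length)]
      by_cases h : c1 = c2
      · subst h
        have hc : p.length < min (p ++ c1 :: r1).length (p ++ c1 :: r2).length ∧
            (p ++ c1 :: r1).getD p.length ' ' = (p ++ c1 :: r2).getD p.length ' ' := by
          refine ⟨by simp, by rw [hg1, hg2]⟩
        rw [dif_pos hc]
        have e1 : p ++ c1 :: r1 = (p ++ [c1]) ++ r1 := by simp
        have e2 : p ++ c1 :: r2 = (p ++ [c1]) ++ r2 := by simp
        have e3 : p.length + 1 = (p ++ [c1]).length := by simp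
        rw [e1, e2, e3, ih r2 (p ++ [c1])]
        simp [pvSpecFn]
      · have hc : ¬ (p.length < min (p ++ c1 :: r1).length (p ++ c2 :: r2).length ∧
            (p ++ c1 :: r1).getD p.length ' ' = (p ++ c2 :: r2).getD p.length ' ') := by
          rw [hg1, hg2]; tauto
        rw [dif_neg hc]
        have h2 : p.length ≠ (p ++ c1 :: r1).length := by simp
        rw [if_neg h2]
        have d2 : (p ++ c2 :: r2).drop (p.length + 1) = r2 := by
          have e2 : p ++ c2 :: r2 = (p ++ [c2]) ++ r2 := by simp
          have e3 : p.length + 1 = (p ++ [c2]).length := by simp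
          rw [e2, e3, List.drop_left]
        have s2 : PySem.List.slice (p ++ c2 :: r2) (some ((p.length : Int) + 1)) none = r2 := by
          rw [show ((p.length : Int) + 1) = (((p.length + 1 : Nat)) : Int) by push_cast; ring,
            PySem.List.slice_from_natCast, d2]
        simp [PySem.List.slice_from_natCast, s2, pvSpecFn, h]

-- ===== VERDICT (by name: the statement is the Claim_ definition above) =====
theorem esCambio_spec : Claim_equal_esCambio := by
  intro s1 s2 _ _
  unfold Spec_esCambio esCambio esCambio_alt
  have hA := esCambioGo_eq s1.toList s2.toList []
  have hB := esCambioAltLoop_eq s1.toList s2.toList []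
  simp only [List.nil_append, List.length_nil] at hA hB
  rw [hA, hB]
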